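-- pv_equiv track=rewrite | github.com/Leewonchan14/CodingTest | 프로그래머스/0/181890. 왼쪽 오른쪽/왼쪽 오른쪽.py | solution
-- ===== SOURCE A (Python) =====
-- def solution(str_list):
--     answer = []
--
--     for i in range(len(str_list)):
--         if str_list[i] == "l" or str_list[i] == "r":
--             if str_list[i] == "r":
--                 answer = str_list[i+1:]
--                 break
--             else:
--                 answer = str_list[:i]
--                 break
--
--     return answer
-- ===== SOURCE B (Python) =====
-- def solution(str_list):
--     n = len(str_list)
--     i_l = str_list.index("l") if "l" in str_list else n
--     i_r = str_list.index("r") if "r" in str_list else n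
--     if i_l == n and i_r == n:
--         return []
--     if i_r < i_l:
--         return str_list[i_r + 1:]
--     return str_list[:i_l]
-- ===== Notes on version B (the rewrite author's own statement) =====
-- stated objective: alternative
-- what changed: Replaces the single break-on-first-hit scan by two independent locate passes (index of 'l' and of 'r' with length as absent sentinel) followed by a comparison of the two indices to pick the slice.
import Mathlib
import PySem

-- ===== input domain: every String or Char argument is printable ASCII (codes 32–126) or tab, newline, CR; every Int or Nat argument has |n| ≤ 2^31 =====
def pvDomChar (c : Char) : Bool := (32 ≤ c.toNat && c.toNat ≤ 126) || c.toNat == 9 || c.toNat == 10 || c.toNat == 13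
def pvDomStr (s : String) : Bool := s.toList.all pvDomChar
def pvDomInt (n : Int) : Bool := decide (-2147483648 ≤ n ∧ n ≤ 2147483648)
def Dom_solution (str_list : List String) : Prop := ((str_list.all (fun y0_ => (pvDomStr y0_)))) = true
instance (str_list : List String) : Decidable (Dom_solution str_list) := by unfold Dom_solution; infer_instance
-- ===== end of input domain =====

-- B replaces A's single break-on-first-hit scan by two independent locate passes
-- ('l'-index and 'r'-index with length as absent sentinel) plus a comparison (objective: alternative).

-- ===== PORT A =====
-- the for-loop over range(len(str_list)) with break, as structural recursion on the index
def solutionGo (str_list : List String) (i : Nat) : List String :=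
  if h : i < str_list.length then
    if str_list[i] = "l" ∨ str_list[i] = "r" then
      if str_list[i] = "r" then
        PySem.List.slice str_list (some ((i : Int) + 1)) none
      else
        PySem.List.slice str_list none (some (i : Int))
    else solutionGo str_list (i + 1)
  else []
termination_by str_list.length - i

def solution (str_list : List String) : List String := solutionGo str_list 0

-- ===== PORT B =====
def solution_alt (str_list : List String) : List String :=
  let n := str_list.length
  let iL := match PySem.List.index? str_list "l" with | some k => k | none => n
  let iR := match PySem.List.index? str_list "r" with | some k => k | none => n
  if iL = n ∧ iR = n then []
  else if iR < iL then PySem.List.slice str_list (some ((iR : Int) + 1)) none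
  else PySem.List.slice str_list none (some ((iL : Int)))

-- ===== PRECONDITION & SPEC =====
def Spec_solution (str_list : List String) (out : List String) : Prop := out = solution_alt str_list
instance (str_list : List String) (out : List String) : Decidable (Spec_solution str_list out) := by unfold Spec_solution; infer_instance

-- ===== CLAIM (what is proved, stated in full; the proofs are below) =====
def Claim_equal_solution : Prop := ∀ (str_list : List String), Dom_solution str_list → Spec_solution str_list (solution str_list)

-- ===== LEMMAS AND PROOFS =====

-- if x first occurs at position i, index? finds exactly i
lemma index?_eq_of_first {x : String} {l : List String} {i : Nat} (hi : i < l.length)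
    (hx : l[i] = x) (hprev : ∀ j (hj : j < l.length), j < i → l[j] ≠ x) :
    PySem.List.index? l x = some i := by
  rw [PySem.List.index?_eq_some_iff]
  refine ⟨l.take i, l.drop (i + 1), ?_, by simp [hi.le], ?_⟩
  · conv_lhs => rw [← List.take_append_drop i l]
    rw [List.drop_eq_getElem_cons hi, hx]
  · intro hmem
    rcases List.mem_iff_getElem.1 hmem with ⟨j, hj, hjx⟩
    have hj' : j < i := by simpa using (List.length_take ..) ▸ hj |>.trans_le (by simp)
    rw [List.getElem_take] at hjx
    exact hprev j (hj'.trans hi) hj' hjx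

-- if x does not occur among the first i positions, any hit of index? is ≥ i
lemma index?_ge_of_not_before {x : String} {l : List String} {i k : Nat}
    (hprev : ∀ j (hj : j < l.length), j < i → l[j] ≠ x)
    (hk : PySem.List.index? l x = some k) : i ≤ k := by
  rcases PySem.List.getElem_of_index?_eq_some hk with ⟨hklt, hkx, _⟩
  by_contra h
  exact hprev k hklt (by omega) hkx

lemma go_eq (m : Nat) : ∀ (l : List String) (i : Nat), l.length - i ≤ m →
    (∀ j (hj : j < l.length), j < i → l[j] ≠ "l" ∧ l[j] ≠ "r") →
    solutionGo l i = solution_alt l := by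
  induction m with
  | zero =>
    intro l i hm hprev
    have hlen : l.length ≤ i := by omega
    rw [solutionGo]
    rw [dif_neg (by omega)]
    have hnot : ∀ x : String, (∀ j (hj : j < l.length), l[j] ≠ x) → PySem.List.index? l x = none := by
      intro x hx
      rw [PySem.List.index?_eq_none_iff]
      intro hmem
      rcases List.mem_iff_getElem.1 hmem with ⟨j, hj, hjx⟩
      exact hx j hj hjx
    have hL := hnot "l" (fun j hj => (hprev j hj (by omega)).1)
    have hR := hnot "r" (fun j hj => (hprev j hj (by omega)).2)
    simp only [solution_alt, hL, hR]
    simp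
  | succ m ih =>
    intro l i hm hprev
    rw [solutionGo]
    by_cases h : i < l.length
    · rw [dif_pos h]
      by_cases hr : l[i] = "r"
      · rw [if_pos (Or.inr hr), if_pos hr]
        have hiR : PySem.List.index? l "r" = some i :=
          index?_eq_of_first h hr (fun j hj hji => (hprev j hj hji).2)
        have : solution_alt l = PySem.List.slice l (some ((i : Int) + 1)) none := by
          unfold solution_alt
          rcases hLc : PySem.List.index? l "l" with _ | k
          · simp only [hiR]
            rw [if_neg (by omega), if_pos (by omega)]
          · have hik : i ≤ k := index?_ge_of_not_before
              (fun j hj hji => (hprev j hj hji).1) hLc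
            have hik' : i ≠ k := by
              intro he
              subst he
              rcases PySem.List.getElem_of_index?_eq_some hLc with ⟨hklt, hkx, _⟩
              exact absurd (hr.symm.trans hkx) (by decide)
            simp only [hiR]
            rw [if_neg (by omega), if_pos (by omega)]
        rw [this]
      · by_cases hl : l[i] = "l"
        · rw [if_pos (Or.inl hl), if_neg hr]
          have hiL : PySem.List.index? l "l" = some i :=
            index?_eq_of_first h hl (fun j hj hji => (hprev j hj hji).1)
          have : solution_alt l = PySem.List.slice l none (some ((i : Int))) := by
            unfold solution_alt
            rcases hRc : PySem.List.index? l "r" with _ | k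
            · simp only [hiL]
              rw [if_neg (by omega), if_neg (by omega)]
            · have hik : i ≤ k := index?_ge_of_not_before
                (fun j hj hji => (hprev j hj hji).2) hRc
              have hik' : i ≠ k := by
                intro he
                subst he
                rcases PySem.List.getElem_of_index?_eq_some hRc with ⟨hklt, hkx, _⟩
                exact absurd (hl.symm.trans hkx) (by decide)
              simp only [hiL]
              rw [if_neg (by omega), if_neg (by omega)]
          rw [this]
        · rw [if_neg (by tauto)]
          exact ih l (i + 1) (by omega) (fun j hj hji => by
            rcases Nat.lt_or_ge j i with h' | h'
            · exact hprev j hj h'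
            · have : j = i := by omega
              subst this
              exact ⟨hl, hr⟩)
    · rw [dif_neg h]
      have hnot : ∀ x : String, (∀ j (hj : j < l.length), l[j] ≠ x) → PySem.List.index? l x = none := by
        intro x hx
        rw [PySem.List.index?_eq_none_iff]
        intro hmem
        rcases List.mem_iff_getElem.1 hmem with ⟨j, hj, hjx⟩
        exact hx j hj hjx
      have hL := hnot "l" (fun j hj => (hprev j hj (by omega)).1)
      have hR := hnot "r" (fun j hj => (hprev j hj (by omega)).2)
      simp only [solution_alt, hL, hR]
      simp

-- ===== VERDICT (by name: the statement is the Claim_ definition above) =====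
theorem solution_spec : Claim_equal_solution := by
  intro l _
  unfold Spec_solution solution
  exact go_eq l.length l 0 (by omega) (by omega)
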